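-- pv_equiv track=rewrite | github.com/globocom/dojo | 2024_01_10/dojo.py | return_number_in_line_left
-- ===== SOURCE A (Python) =====
-- def return_number_in_line_left(line, index):
--     if index < 0 or index == len(line) or not line[index].isnumeric():
--         return None
--
--     num = line[index]
--     ant_num = return_number_in_line_left(line, index - 1)
--     if ant_num is None:
--         ant_num = num
--     else:
--         ant_num += num
--
--     return ant_num
-- ===== SOURCE B (Python) =====
-- def return_number_in_line_left(line, index):
--     if index < 0 or index == len(line) or not line[index].isnumeric():
--         return None
--     j = index
--     while j >= 0 and line[j].isnumeric():
--         j -= 1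
--     return line[j + 1:index + 1]
-- ===== Notes on version B (the rewrite author's own statement) =====
-- stated objective: simpler
-- what changed: Replaces the recursive character-by-character accumulation with an iterative scan that finds the left boundary of the numeric run and returns one slice.
import Mathlib
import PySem

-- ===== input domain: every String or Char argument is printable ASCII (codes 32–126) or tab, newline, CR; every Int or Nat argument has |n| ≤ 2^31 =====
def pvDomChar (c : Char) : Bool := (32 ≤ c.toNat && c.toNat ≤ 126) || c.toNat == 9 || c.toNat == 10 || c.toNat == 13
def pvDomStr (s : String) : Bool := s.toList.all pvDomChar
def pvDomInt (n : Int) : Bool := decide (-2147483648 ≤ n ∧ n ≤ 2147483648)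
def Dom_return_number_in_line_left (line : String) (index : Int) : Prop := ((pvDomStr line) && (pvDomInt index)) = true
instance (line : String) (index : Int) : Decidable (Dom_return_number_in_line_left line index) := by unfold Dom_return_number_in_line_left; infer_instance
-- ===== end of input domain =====

-- B replaces A's recursion (which accumulates the run char by char) with an iterative
-- boundary scan plus a single slice; objective: simpler. On the ASCII domain, Python's
-- str.isnumeric on one char coincides with isdigit, so both ports use PySem.Chars.isdigit.
-- ===== PORT A =====
-- recursive helper on the code-point list, following A's recursion step for step
def retLeftA (l : List Char) (index : Int) : Option (List Char) :=
  if _h : index < 0 ∨ index = (l.length : Int) then none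
  else
    match PySem.List.pyGet? l index with
    | none => none   -- Python raises IndexError here (index > len(line)); excluded by Pre_
    | some c =>
      if ¬ PySem.Chars.isdigit c then none
      else
        match retLeftA l (index - 1) with
        | none => some [c]
        | some s => some (s ++ [c])
termination_by (index + 1).toNat
decreasing_by omega

def return_number_in_line_left (line : String) (index : Int) : Option String :=
  (retLeftA line.toList index).map String.ofList

-- ===== PORT B =====
-- the while loop: decrement j while j >= 0 and line[j].isnumeric()
def runStartB (l : List Char) (j : Int) : Int :=
  if h : 0 ≤ j ∧ ((PySem.List.pyGet? l j).elim false PySem.Chars.isdigit) then runStartB l (j - 1)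
  else j
termination_by (j + 1).toNat
decreasing_by omega

def return_number_in_line_left_alt (line : String) (index : Int) : Option String :=
  let l := line.toList
  if index < 0 ∨ index = (l.length : Int) then none
  else
    match PySem.List.pyGet? l index with
    | none => none   -- same guard as A: IndexError for index > len(line); excluded by Pre_
    | some c =>
      if ¬ PySem.Chars.isdigit c then none
      else
        let j := runStartB l index
        some (String.ofList (PySem.List.slice l (some (j + 1)) (some (index + 1))))

-- ===== PRECONDITION & SPEC =====
-- Pre_ excludes exactly index > len(line), where Python A (and B) raise IndexError.
def Pre_return_number_in_line_left (line : String) (index : Int) : Prop :=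
  index ≤ (line.toList.length : Int)
instance (line : String) (index : Int) : Decidable (Pre_return_number_in_line_left line index) := by
  unfold Pre_return_number_in_line_left; infer_instance

def pvWitness_return_number_in_line_left : String × Int := ("a12", 2)

def Spec_return_number_in_line_left (line : String) (index : Int) (out : Option String) : Prop := out = return_number_in_line_left_alt line index
instance (line : String) (index : Int) (out : Option String) : Decidable (Spec_return_number_in_line_left line index out) := by unfold Spec_return_number_in_line_left; infer_instance

-- ===== CLAIM (what is proved, stated in full; the proofs are below) =====
def Claim_equal_return_number_in_line_left : Prop := ∀ (line : String) (index : Int), Dom_return_number_in_line_left line index → Pre_return_number_in_line_left line index → Spec_return_number_in_line_left line index (return_number_in_line_left line index)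

-- ===== LEMMAS AND PROOFS =====

-- one unfolding step of B's while loop, and its stop case
theorem runStartB_step (l : List Char) (j : Int)
    (h : 0 ≤ j ∧ ((PySem.List.pyGet? l j).elim false PySem.Chars.isdigit)) :
    runStartB l j = runStartB l (j - 1) := by
  rw [runStartB.eq_def]; simp [h]

theorem runStartB_stop (l : List Char) (j : Int)
    (h : ¬ (0 ≤ j ∧ ((PySem.List.pyGet? l j).elim false PySem.Chars.isdigit))) :
    runStartB l j = j := by
  rw [runStartB.eq_def]; simp only [h, dite_false]

-- appending the last element to a slice: l[a:b] ++ [l[b]] = l[a:b+1]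
theorem slice_snoc (l : List Char) (a b : Int) (h0 : 0 ≤ a) (hab : a ≤ b)
    (_hb : b < (l.length : Int)) (hn : b.toNat < l.length) :
    PySem.List.slice l (some a) (some (b + 1))
      = PySem.List.slice l (some a) (some b) ++ [l[b.toNat]] := by
  rw [PySem.List.slice_toNat l (a := a) (b := b + 1) h0 (by omega),
    PySem.List.slice_toNat l (a := a) (b := b) h0 (by omega)]
  have h1 : (b + 1).toNat - a.toNat = (b.toNat - a.toNat) + 1 := by omega
  rw [h1, List.take_add_one]
  have h2 : (l.drop a.toNat)[b.toNat - a.toNat]? = some l[b.toNat] := by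
    rw [List.getElem?_drop]
    have h3 : a.toNat + (b.toNat - a.toNat) = b.toNat := by omega
    rw [h3, List.getElem?_eq_getElem hn]
  rw [h2]
  rfl

-- main invariant: on a digit position n, A's recursion returns exactly B's slice,
-- and B's loop lands strictly left of n, at -1 at the lowest
theorem retLeftA_eq_slice (l : List Char) (n : Nat) (hlen : n < l.length)
    (hd : PySem.Chars.isdigit (l[n]) = true) :
    retLeftA l (n : Int)
      = some (PySem.List.slice l (some (runStartB l (n : Int) + 1)) (some ((n : Int) + 1)))
    ∧ -1 ≤ runStartB l (n : Int) ∧ runStartB l (n : Int) < (n : Int) := by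
  induction n using Nat.strong_induction_on with
  | _ n ih =>
    have hget := PySem.List.pyGet?_ofNat l n hlen
    have hg : ¬ ((n : Int) < 0 ∨ (n : Int) = (l.length : Int)) := by omega
    have hstep : runStartB l (n : Int) = runStartB l ((n : Int) - 1) :=
      runStartB_step l _ ⟨by omega, by rw [hget]; exact hd⟩
    have hA0 : retLeftA l (n : Int)
        = match retLeftA l ((n : Int) - 1) with
          | none => some [l[n]] | some s => some (s ++ [l[n]]) := by
      rw [retLeftA.eq_def, dif_neg hg, hget]; simp [hd]
    rcases Nat.eq_zero_or_pos n with h0 | hpos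
    · subst h0
      have hm1 : ((0 : Nat) : Int) - 1 = -1 := by norm_num
      have hnone : retLeftA l (-1 : Int) = none := by rw [retLeftA.eq_def]; simp
      have hrun : runStartB l ((0 : Nat) : Int) = -1 := by
        rw [hstep, hm1]; exact runStartB_stop l _ (by intro h; omega)
      rw [hA0, hm1, hnone, hrun]
      refine ⟨?_, by omega, by omega⟩
      rw [show (-1 : Int) + 1 = (((0 : Nat) : Int)) by norm_num,
        PySem.List.slice_toNat l (by omega) (by omega)]
      cases l with
      | nil => simp at hlen
      | cons a t => simp
    · have hcast : ((n : Int) - 1) = ((n - 1 : Nat) : Int) := by omega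
      have hlen' : n - 1 < l.length := by omega
      have hget' := PySem.List.pyGet?_ofNat l (n - 1) hlen'
      have hsn : ((n - 1 : Nat) : Int) + 1 = (n : Int) := by omega
      by_cases hd' : PySem.Chars.isdigit (l[n - 1]) = true
      · obtain ⟨ha, hb1, hb2⟩ := ih (n - 1) (by omega) hlen' hd'
        have hrun : runStartB l (n : Int) = runStartB l ((n - 1 : Nat) : Int) := by
          rw [hstep, hcast]
        rw [hA0, hcast, ha, hrun]
        refine ⟨?_, by omega, by omega⟩
        have hsl := slice_snoc l (runStartB l ((n - 1 : Nat) : Int) + 1) (n : Int)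
          (by omega) (by omega) (by omega) (by simpa using hlen)
        simp only [Int.toNat_natCast] at hsl
        rw [hsl, hsn]
      · have hnone : retLeftA l ((n : Int) - 1) = none := by
          rw [hcast, retLeftA.eq_def, dif_neg (by omega), hget']
          simp [hd']
        have hrun : runStartB l (n : Int) = ((n - 1 : Nat) : Int) := by
          rw [hstep, hcast]
          exact runStartB_stop l _ (by simp [hget', hd'])
        rw [hA0, hnone, hrun]
        refine ⟨?_, by omega, by omega⟩
        have hsl := slice_snoc l (n : Int) (n : Int) (by omega) (by omega) (by omega)
          (by simpa using hlen)
        simp only [Int.toNat_natCast] at hsl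
        rw [hsn, hsl, PySem.List.slice_toNat l (by omega) (by omega)]
        simp

-- ===== VERDICT (by name: the statement is the Claim_ definition above) =====
theorem return_number_in_line_left_spec : Claim_equal_return_number_in_line_left := by
  intro line index _ hpre
  unfold Spec_return_number_in_line_left return_number_in_line_left return_number_in_line_left_alt
  unfold Pre_return_number_in_line_left at hpre
  by_cases hg : index < 0 ∨ index = (line.toList.length : Int)
  · have hg' : index < 0 ∨ index = (line.length : Int) := by simpa using hg
    rw [retLeftA.eq_def]
    simp [hg']
  · have h0 : 0 ≤ index := by omega
    obtain ⟨n, rfl⟩ : ∃ m : Nat, index = (m : Int) := ⟨index.toNat, by omega⟩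
    have hn : n < line.toList.length := by omega
    have hn' : n < line.length := by simpa using hn
    have hne : ¬ n = line.length := Nat.ne_of_lt hn'
    have hget : PySem.List.pyGet? line.toList (n : Int) = some (line.toList[n]) :=
      PySem.List.pyGet?_ofNat line.toList n hn
    by_cases hd : PySem.Chars.isdigit (line.toList[n]) = true
    · have hmain := retLeftA_eq_slice line.toList n hn hd
      rw [hmain.1]
      simp [hne, hget, hd]
    · rw [retLeftA.eq_def, dif_neg hg, hget]
      simp [hne, hget, hd]
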